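-- pv_equiv track=rewrite | github.com/Devansh-236/HACKIIIT | ai_recruitment_system/app/agents/candidate_assessor.py | _generate_behavioral_questions
-- ===== SOURCE A (Python) =====
-- from typing import Dict, List, Any, Optional
--
-- def _generate_behavioral_questions(job_title: str) -> List[Dict[str, Any]]:
--     """Generate behavioral questions based on the job title"""
--     # Base set of behavioral questions
--     questions = [
--         "Describe a situation where you had to meet a tight deadline.",
--         "Tell me about a time when you had to work with a difficult team member.",
--         "Describe a project that failed and what you learned from it.",
--         "Tell me about a time when you took initiative on a project.",
--         "Describe how you handled a situation with competing priorities."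
--     ]
--
--     # Add role-specific questions
--     if "lead" in job_title.lower() or "senior" in job_title.lower() or "manager" in job_title.lower():
--         leadership_questions = [
--             "Describe your leadership style and how you motivate your team.",
--             "Tell me about a time when you had to make a difficult decision as a leader.",
--             "How do you delegate tasks within your team?"
--         ]
--         questions.extend(leadership_questions[:2])
--
--     # Format the questions
--     formatted_questions = []
--     for i, question in enumerate(questions[:5]):  # Limit to 5 questions
--         formatted_questions.append({
--             "question_id": f"BQ-{i+1}",
--             "question": question,
--             "type": "behavioral"
--         })
--
--     return formatted_questions
-- ===== SOURCE B (Python) =====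
-- def _generate_behavioral_questions(job_title: str) -> list:
--     # The output is a constant: the base list already has 5 questions and
--     # A's [:5] cap discards any leadership additions, so no computation is
--     # needed at all.  A fresh list of fresh dicts is built on every call.
--     return [
--         {"question_id": "BQ-1",
--          "question": "Describe a situation where you had to meet a tight deadline.",
--          "type": "behavioral"},
--         {"question_id": "BQ-2",
--          "question": "Tell me about a time when you had to work with a difficult team member.",
--          "type": "behavioral"},
--         {"question_id": "BQ-3",
--          "question": "Describe a project that failed and what you learned from it.",
--          "type": "behavioral"},
--         {"question_id": "BQ-4",
--          "question": "Tell me about a time when you took initiative on a project.",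
--          "type": "behavioral"},
--         {"question_id": "BQ-5",
--          "question": "Describe how you handled a situation with competing priorities.",
--          "type": "behavioral"},
--     ]
-- ===== Notes on version B (the rewrite author's own statement) =====
-- stated objective: simpler
-- what changed: B is a precomputed closed-form constant: since the base list already has 5 items and A slices [:5], the job-title branch and the enumerate loop are dropped entirely and the five formatted dicts are returned as a literal list.
import Mathlib
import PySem

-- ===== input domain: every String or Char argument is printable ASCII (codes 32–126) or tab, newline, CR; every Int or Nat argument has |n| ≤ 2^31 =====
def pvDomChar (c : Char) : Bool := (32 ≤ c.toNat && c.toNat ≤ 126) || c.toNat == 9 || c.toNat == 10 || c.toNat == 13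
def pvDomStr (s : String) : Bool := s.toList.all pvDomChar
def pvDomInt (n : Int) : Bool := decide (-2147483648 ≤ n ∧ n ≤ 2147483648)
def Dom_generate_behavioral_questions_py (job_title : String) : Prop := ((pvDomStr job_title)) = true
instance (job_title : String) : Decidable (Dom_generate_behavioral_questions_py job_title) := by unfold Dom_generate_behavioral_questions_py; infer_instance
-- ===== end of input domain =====

-- B replaces A's branch-and-enumerate construction with a precomputed constant: A's [:5] cap makes the output independent of job_title.


-- ===== PORT A =====
def generate_behavioral_questions_py (job_title : String) : List (List (String × String)) :=
  let questions : List String := [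
    "Describe a situation where you had to meet a tight deadline.",
    "Tell me about a time when you had to work with a difficult team member.",
    "Describe a project that failed and what you learned from it.",
    "Tell me about a time when you took initiative on a project.",
    "Describe how you handled a situation with competing priorities."]
  let jt := PySem.Str.lower job_title
  let questions :=
    if PySem.Str.isIn "lead" jt || PySem.Str.isIn "senior" jt || PySem.Str.isIn "manager" jt then
      let leadership_questions : List String := [
        "Describe your leadership style and how you motivate your team.",
        "Tell me about a time when you had to make a difficult decision as a leader.",
        "How do you delegate tasks within your team?"]
      questions ++ PySem.List.slice leadership_questions none (some 2)
    else questions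
  (PySem.List.enumerate (PySem.List.slice questions none (some 5))).foldl
    (fun acc iq =>
      acc ++ [[("question_id", "BQ-" ++ PySem.Int.toStr ((iq.1 : Int) + 1)),
               ("question", iq.2), ("type", "behavioral")]]) []

-- ===== PORT B =====
def generate_behavioral_questions_py_alt (_job_title : String) : List (List (String × String)) :=
  [[("question_id", "BQ-1"),
    ("question", "Describe a situation where you had to meet a tight deadline."),
    ("type", "behavioral")],
   [("question_id", "BQ-2"),
    ("question", "Tell me about a time when you had to work with a difficult team member."),
    ("type", "behavioral")],
   [("question_id", "BQ-3"),
    ("question", "Describe a project that failed and what you learned from it."),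
    ("type", "behavioral")],
   [("question_id", "BQ-4"),
    ("question", "Tell me about a time when you took initiative on a project."),
    ("type", "behavioral")],
   [("question_id", "BQ-5"),
    ("question", "Describe how you handled a situation with competing priorities."),
    ("type", "behavioral")]]

-- ===== PRECONDITION & SPEC =====
def Spec_generate_behavioral_questions_py (job_title : String) (out : List (List (String × String))) : Prop := out = generate_behavioral_questions_py_alt job_title
instance (job_title : String) (out : List (List (String × String))) : Decidable (Spec_generate_behavioral_questions_py job_title out) := by unfold Spec_generate_behavioral_questions_py; infer_instance

-- ===== CLAIM (what is proved, stated in full; the proofs are below) =====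
def Claim_equal_generate_behavioral_questions_py : Prop := ∀ (job_title : String), Dom_generate_behavioral_questions_py job_title → Spec_generate_behavioral_questions_py job_title (generate_behavioral_questions_py job_title)

-- ===== LEMMAS AND PROOFS =====

-- ===== VERDICT (by name: the statement is the Claim_ definition above) =====
theorem generate_behavioral_questions_py_spec : Claim_equal_generate_behavioral_questions_py := by
  intro job_title _
  unfold Spec_generate_behavioral_questions_py generate_behavioral_questions_py generate_behavioral_questions_py_alt
  by_cases h : (PySem.Str.isIn "lead" (PySem.Str.lower job_title) || PySem.Str.isIn "senior" (PySem.Str.lower job_title) || PySem.Str.isIn "manager" (PySem.Str.lower job_title)) = true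
  · simp only [h, if_true]; rfl
  · simp only [h, Bool.false_eq_true, if_false]; rfl
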